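-- pv_equiv track=rewrite | github.com/wangjiaxing0617/Embedding-model-fine-tune | scripts/pdf_processor.py | is_table_line
-- ===== SOURCE A (Python) =====
-- def is_table_line(text: str, prev_line:str) -> bool:
--     """
--     判断一行是否为表格行
--     """
--     def has_consistent_structure(text: str, prev_line: str) -> bool:
--         if not prev_line:
--             return False
--         # 空格分布相似性（粗略检测）
--         space_pos_current = [i for i, char in enumerate(text) if char == ' ']
--         space_pos_prev = [i for i, char in enumerate(prev_line) if char == ' ']
--
--         # 检查是否有共同的空间位置（列对齐）
--         common_positions = set(space_pos_current) & set(space_pos_prev)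
--         return (len(common_positions) >= 2)
--
--     # 主检测逻辑
--     structure_match = has_consistent_structure(text, prev_line)
--     if structure_match:
--         return True
--     else:
--         return False
-- ===== SOURCE B (Python) =====
-- def is_table_line(text: str, prev_line: str) -> bool:
--     # One fused pass over aligned character pairs: count positions that are
--     # a space in BOTH lines; >= 2 shared space columns means table-like.
--     return sum(1 for a, b in zip(text, prev_line) if a == b == ' ') >= 2
-- ===== Notes on version B (the rewrite author's own statement) =====
-- stated objective: idiomatic
-- what changed: Replaced the two independent space-index scans plus set intersection with a single fused pass over zip(text, prev_line) counting positions that are a space in both strings; no index lists or sets are built and the empty-prev_line guard becomes implicit.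
import Mathlib
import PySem

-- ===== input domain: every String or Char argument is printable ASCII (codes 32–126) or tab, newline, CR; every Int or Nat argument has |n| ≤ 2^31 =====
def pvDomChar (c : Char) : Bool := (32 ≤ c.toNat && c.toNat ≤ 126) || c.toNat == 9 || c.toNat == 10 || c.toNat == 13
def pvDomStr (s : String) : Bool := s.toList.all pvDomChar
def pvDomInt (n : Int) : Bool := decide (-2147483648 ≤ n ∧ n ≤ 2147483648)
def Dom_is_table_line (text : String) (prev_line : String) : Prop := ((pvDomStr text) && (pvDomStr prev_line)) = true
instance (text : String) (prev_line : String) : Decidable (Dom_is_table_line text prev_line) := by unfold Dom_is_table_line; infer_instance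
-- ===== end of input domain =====

-- B replaces A's two space-index scans plus set intersection with one fused pass over the
-- zipped character pairs, counting columns that are a space in both lines (idiomatic).

-- ===== PORT A =====
-- [i for i, char in enumerate(s) if char == ' ']
def spacePositions (s : List Char) : List Int :=
  ((PySem.List.enumerate s 0).filter (fun p => p.2 = ' ')).map (fun p => p.1)

def is_table_line (text : String) (prev_line : String) : Bool :=
  let structure_match : Bool :=
    if prev_line.toList = [] then false
    else
      let space_pos_current := spacePositions text.toList
      let space_pos_prev := spacePositions prev_line.toList
      let common_positions :=
        PySem.Set.inter (PySem.Set.ofList space_pos_current) (PySem.Set.ofList space_pos_prev)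
      decide (2 ≤ common_positions.length)
  if structure_match then true else false

-- ===== PORT B =====
-- sum(1 for a, b in zip(text, prev_line) if a == b == ' ') >= 2
def is_table_line_alt (text : String) (prev_line : String) : Bool :=
  decide (2 ≤ ((text.toList.zip prev_line.toList).countP (fun p => p.1 = ' ' && p.2 = ' ')))

-- ===== PRECONDITION & SPEC =====
def Spec_is_table_line (text : String) (prev_line : String) (out : Bool) : Prop := out = is_table_line_alt text prev_line
instance (text : String) (prev_line : String) (out : Bool) : Decidable (Spec_is_table_line text prev_line out) := by unfold Spec_is_table_line; infer_instance

-- ===== CLAIM (what is proved, stated in full; the proofs are below) =====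
def Claim_equal_is_table_line : Prop := ∀ (text : String) (prev_line : String), Dom_is_table_line text prev_line → Spec_is_table_line text prev_line (is_table_line text prev_line)

-- ===== LEMMAS AND PROOFS =====

-- proof-side generalisation of spacePositions with an arbitrary start index
def spIdx (l : List Char) (s : Int) : List Int :=
  ((PySem.List.enumerate l s).filter (fun p => p.2 = ' ')).map (fun p => p.1)

theorem spacePositions_eq_spIdx (l : List Char) : spacePositions l = spIdx l 0 := rfl

theorem spIdx_cons (a : Char) (t : List Char) (s : Int) :
    spIdx (a :: t) s = (if a = ' ' then [s] else []) ++ spIdx t (s + 1) := by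
  simp only [spIdx, PySem.List.enumerate_cons, List.filter_cons]
  by_cases h : a = ' ' <;> simp [h]

theorem mem_spIdx_ge {l : List Char} {s i : Int} (h : i ∈ spIdx l s) : s ≤ i := by
  simp only [spIdx, List.mem_map, List.mem_filter] at h
  obtain ⟨p, ⟨hp, -⟩, rfl⟩ := h
  rw [PySem.List.mem_enumerate_iff] at hp
  obtain ⟨k, hk, rfl⟩ := hp
  omega

theorem spIdx_pairwise (l : List Char) (s : Int) : (spIdx l s).Pairwise (· < ·) := by
  have := (PySem.List.pairwise_lt_enumerate l s).filter (fun p => p.2 = ' ')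
  simpa [spIdx, List.pairwise_map] using this

theorem spIdx_nodup (l : List Char) (s : Int) : (spIdx l s).Nodup :=
  (spIdx_pairwise l s).imp (fun h => ne_of_lt h)

-- the core counting identity: shared space positions = aligned space pairs
theorem spIdx_filter_length (l1 : List Char) :
    ∀ (l2 : List Char) (s : Int),
      ((spIdx l1 s).filter (fun i => PySem.Set.contains (spIdx l2 s) i)).length
        = (l1.zip l2).countP (fun p => p.1 = ' ' && p.2 = ' ') := by
  induction l1 with
  | nil => intro l2 s; simp [spIdx]
  | cons a t1 ih =>
    intro l2 s
    cases l2 with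
    | nil =>
      simp [spIdx]
    | cons b t2 =>
      have htail : ((spIdx t1 (s + 1)).filter
            (fun i => PySem.Set.contains (spIdx (b :: t2) s) i)).length
          = ((spIdx t1 (s + 1)).filter (fun i => PySem.Set.contains (spIdx t2 (s + 1)) i)).length := by
        congr 1
        apply List.filter_congr
        intro i hi
        have his : s + 1 ≤ i := mem_spIdx_ge hi
        rw [spIdx_cons]
        by_cases hb : b = ' '
        · simp [hb, PySem.Set.contains]
          intro h'; exact absurd h' (by omega)
        · simp [hb, PySem.Set.contains]
      have hhead : PySem.Set.contains (spIdx (b :: t2) s) s = decide (b = ' ') := by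
        rw [spIdx_cons]
        by_cases hb : b = ' '
        · simp [hb, PySem.Set.contains]
        · simp [hb, PySem.Set.contains]
          intro h'; exact absurd (mem_spIdx_ge h') (by omega)
      rw [spIdx_cons a t1 s, List.filter_append, List.length_append, htail, ih t2 (s + 1),
        List.zip_cons_cons, List.countP_cons]
      by_cases ha : a = ' ' <;> by_cases hb : b = ' ' <;>
        simp [ha, hb, List.filter_cons, spIdx_cons] <;>
        first
          | omega
          | (intro h'; exact absurd (mem_spIdx_ge h') (by omega))

theorem common_length_eq (t p : List Char) :
    (PySem.Set.inter (PySem.Set.ofList (spacePositions t)) (PySem.Set.ofList (spacePositions p))).length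
      = (t.zip p).countP (fun q => q.1 = ' ' && q.2 = ' ') := by
  rw [spacePositions_eq_spIdx, spacePositions_eq_spIdx,
    PySem.Set.ofList_eq_self_of_nodup _ (spIdx_nodup t 0),
    PySem.Set.ofList_eq_self_of_nodup _ (spIdx_nodup p 0)]
  exact spIdx_filter_length t p 0

-- ===== VERDICT (by name: the statement is the Claim_ definition above) =====
theorem is_table_line_spec : Claim_equal_is_table_line := by
  intro text prev_line _
  unfold Spec_is_table_line is_table_line is_table_line_alt
  by_cases h : prev_line.toList = []
  · simp [h]
  · simp [h, common_length_eq]
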